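-- pv_equiv track=rewrite | github.com/tamsinrogers/IdentifierSimilarity | code_snippets.py | func2_b
-- ===== SOURCE A (Python) =====
-- def func2_b(lst1):
--     # sort the list in ascending order
--     lst1 = sorted(lst1, reverse=False)
--     l = len(lst1)
--     lst2 = []
--     lst3 = []
--     for i in range(l):
--         if lst1[i] % 2 == 0:
--             lst2.append(lst1[i])
--         else:
--             lst3.insert(0, lst1[i])
--     return lst2, lst3
-- ===== SOURCE B (Python) =====
-- def func2_b(lst1):
--     evens = [x for x in lst1 if x % 2 == 0]
--     odds = [x for x in lst1 if x % 2 != 0]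
--     return sorted(evens), sorted(odds, reverse=True)
-- ===== Notes on version B (the rewrite author's own statement) =====
-- stated objective: alternative
-- what changed: Partition first with two filters, then sort the evens ascending and the odds descending (reverse=True), instead of sorting the whole list once and splitting it in an index loop with append/insert(0).
import Mathlib
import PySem

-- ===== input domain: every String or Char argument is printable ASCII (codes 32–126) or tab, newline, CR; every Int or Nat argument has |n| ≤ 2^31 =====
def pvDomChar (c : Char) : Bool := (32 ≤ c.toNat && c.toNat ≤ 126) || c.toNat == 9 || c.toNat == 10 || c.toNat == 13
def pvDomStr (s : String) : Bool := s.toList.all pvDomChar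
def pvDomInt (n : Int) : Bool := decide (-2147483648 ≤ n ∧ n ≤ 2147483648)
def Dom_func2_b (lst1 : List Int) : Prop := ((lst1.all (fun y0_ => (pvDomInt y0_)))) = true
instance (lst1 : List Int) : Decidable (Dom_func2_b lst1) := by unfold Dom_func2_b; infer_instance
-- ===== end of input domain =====

-- B partitions first and sorts each half (odds descending) instead of A's single sort plus index-loop split: an alternative decomposition with the same results.


-- ===== PORT A =====
def func2_b (lst1 : List Int) : List Int × List Int :=
  let lst1s := PySem.List.sorted lst1 (fun x => x) false
  let l : Int := (lst1s.length : Int)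
  (PySem.List.pyRange 0 l 1).foldl
    (fun (acc : List Int × List Int) i =>
      if PySem.Int.mod (PySem.List.pyGetD lst1s i 0) 2 = 0 then
        (acc.1 ++ [PySem.List.pyGetD lst1s i 0], acc.2)
      else
        (acc.1, PySem.List.pyGetD lst1s i 0 :: acc.2))  -- insert(0, x) is cons
    ([], [])

-- ===== PORT B =====
def func2_b_alt (lst1 : List Int) : List Int × List Int :=
  let evens := lst1.filter (fun x => PySem.Int.mod x 2 == 0)
  let odds := lst1.filter (fun x => !(PySem.Int.mod x 2 == 0))
  (PySem.List.sorted evens (fun x => x) false,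
   PySem.List.sorted odds (fun x => x) true)

-- ===== PRECONDITION & SPEC =====
def Spec_func2_b (lst1 : List Int) (out : List Int × List Int) : Prop := out = func2_b_alt lst1
instance (lst1 : List Int) (out : List Int × List Int) : Decidable (Spec_func2_b lst1 out) := by unfold Spec_func2_b; infer_instance

-- ===== CLAIM (what is proved, stated in full; the proofs are below) =====
def Claim_equal_func2_b : Prop := ∀ (lst1 : List Int), Dom_func2_b lst1 → Spec_func2_b lst1 (func2_b lst1)

-- ===== LEMMAS AND PROOFS =====

-- A's loop over the sorted list, as a fold, accumulates (evens appended, odds prepended).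
theorem func2_b_foldl_partition (s l2 l3 : List Int) :
    s.foldl
      (fun (acc : List Int × List Int) x =>
        if PySem.Int.mod x 2 = 0 then (acc.1 ++ [x], acc.2) else (acc.1, x :: acc.2))
      (l2, l3)
    = (l2 ++ s.filter (fun x => PySem.Int.mod x 2 == 0),
       (s.filter (fun x => !(PySem.Int.mod x 2 == 0))).reverse ++ l3) := by
  induction s generalizing l2 l3 with
  | nil => simp
  | cons a t ih =>
    simp only [List.foldl_cons, List.filter_cons]
    by_cases h : PySem.Int.mod a 2 = 0
    · rw [if_pos h, ih]
      have hd : (2:Int) ∣ a := (PySem.Int.mod_eq_zero_iff_dvd a 2).mp h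
      simp [hd, List.append_assoc]
    · rw [if_neg h, ih]
      have he : a % 2 = 1 := by
        have hm := PySem.Int.mod_eq_emod_of_pos (a := a) (b := 2) (by norm_num)
        omega
      simp [he]

-- ===== VERDICT (by name: the statement is the Claim_ definition above) =====
theorem func2_b_spec : Claim_equal_func2_b := by
  intro lst1 _
  unfold Spec_func2_b func2_b func2_b_alt
  simp only []
  rw [PySem.List.foldl_pyRange_zero_pyGetD'
        (PySem.List.sorted lst1 (fun x => x) false) 0
        (fun (acc : List Int × List Int) x =>
          if PySem.Int.mod x 2 = 0 then (acc.1 ++ [x], acc.2) else (acc.1, x :: acc.2))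
        ([], [])]
  rw [func2_b_foldl_partition]
  refine Prod.ext ?_ ?_
  · -- evens: filtering the sorted list = sorting the filtered list
    simp only [List.nil_append]
    refine (PySem.List.sorted_id_eq_of_perm_of_pairwise _ _ ?_ ?_).symm
    · exact ((PySem.List.sorted_perm lst1 (fun x => x) false).filter _)
    · exact (PySem.List.sorted_pairwise lst1 (fun x => x)).filter _
  · -- odds: reversed odd part of the sorted list = descending sort of the odd part
    simp only [List.append_nil]
    have hperm : ((PySem.List.sorted lst1 (fun x => x) false).filter
        (fun x => !(PySem.Int.mod x 2 == 0))).reverse.Perm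
        (PySem.List.sorted (lst1.filter (fun x => !(PySem.Int.mod x 2 == 0))) (fun x => x) true) := by
      refine (List.reverse_perm _).trans ?_
      refine ((PySem.List.sorted_perm lst1 (fun x => x) false).filter _).trans ?_
      exact (PySem.List.sorted_perm _ (fun x => x) true).symm
    refine hperm.eq_of_pairwise (fun a b _ _ hab hba => le_antisymm hba hab) ?_ ?_
    · exact List.pairwise_reverse.mpr
        ((PySem.List.sorted_pairwise lst1 (fun x => x)).filter _)
    · exact PySem.List.sorted_pairwise_rev _ (fun x => x)
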